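-- pv_equiv track=rewrite | github.com/arman-tech/spatial-memory-mcp | spatial_memory/hooks/pipeline.py | _derive_namespace
-- ===== SOURCE A (Python) =====
-- _NAMESPACE_MAP: list[tuple[list[str], str]] = [
--     (["decision"], "decisions"),
--     (["error", "solution"], "troubleshooting"),
--     (["pattern", "convention", "workaround", "configuration"], "patterns"),
--     (["important", "explicit"], "notes"),
--     (["definition"], "definitions"),
-- ]
--
-- def _derive_namespace(patterns: list[str]) -> str:
--     """Derive a suggested namespace from matched signal patterns.
--
--     Checks patterns against a priority-ordered mapping and returns the
--     first match.  Falls back to ``"captured"`` if no mapping matches.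
--     """
--     if not patterns:
--         return "captured"
--
--     for pattern_keys, namespace in _NAMESPACE_MAP:
--         for p in patterns:
--             if p in pattern_keys:
--                 return namespace
--
--     return "captured"
-- ===== SOURCE B (Python) =====
-- _NAMESPACE_MAP: list[tuple[list[str], str]] = [
--     (["decision"], "decisions"),
--     (["error", "solution"], "troubleshooting"),
--     (["pattern", "convention", "workaround", "configuration"], "patterns"),
--     (["important", "explicit"], "notes"),
--     (["definition"], "definitions"),
-- ]
--
-- # Flat index: trigger key -> (priority index in _NAMESPACE_MAP, namespace)
-- _KEY_TABLE: dict[str, tuple[int, str]] = {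
--     key: (i, namespace)
--     for i, (keys, namespace) in enumerate(_NAMESPACE_MAP)
--     for key in keys
-- }
--
-- def _derive_namespace(patterns: list[str]) -> str:
--     """Derive a suggested namespace from matched signal patterns."""
--     if not patterns:
--         return "captured"
--     best = None
--     for p in patterns:
--         hit = _KEY_TABLE.get(p)
--         if hit is not None and (best is None or hit[0] < best[0]):
--             best = hit
--     return best[1] if best is not None else "captured"
-- ===== Notes on version B (the rewrite author's own statement) =====
-- stated objective: faster
-- what changed: Replaces the priority-ordered nested scan over _NAMESPACE_MAP with a precomputed key->(priority,namespace) dict and a single min-reducing pass over the patterns.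
import Mathlib
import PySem

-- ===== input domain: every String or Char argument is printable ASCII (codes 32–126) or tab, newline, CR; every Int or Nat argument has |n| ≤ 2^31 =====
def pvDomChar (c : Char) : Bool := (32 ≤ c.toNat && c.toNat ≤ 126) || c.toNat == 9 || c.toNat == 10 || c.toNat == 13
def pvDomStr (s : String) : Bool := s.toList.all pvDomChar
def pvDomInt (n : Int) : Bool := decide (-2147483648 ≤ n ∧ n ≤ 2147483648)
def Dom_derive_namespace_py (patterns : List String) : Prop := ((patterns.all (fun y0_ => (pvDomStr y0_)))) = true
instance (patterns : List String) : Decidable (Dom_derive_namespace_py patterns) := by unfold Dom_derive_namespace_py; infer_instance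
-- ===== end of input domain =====

-- B replaces A's priority-ordered nested scan with a precomputed key->(priority, namespace)
-- table and a single min-reducing pass over the patterns (idiomatic; same exact result).

-- ===== PORT A =====
-- _NAMESPACE_MAP
def nsMap : List (List String × String) :=
  [ (["decision"], "decisions"),
    (["error", "solution"], "troubleshooting"),
    (["pattern", "convention", "workaround", "configuration"], "patterns"),
    (["important", "explicit"], "notes"),
    (["definition"], "definitions") ]

-- the two nested for-loops: for each (keys, ns) in order, return ns on the first p ∈ keys
def aScan : List (List String × String) → List String → Option String
  | [], _ => none
  | (keys, ns) :: rest, ps =>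
      if ps.any (fun p => keys.contains p) then some ns else aScan rest ps

def derive_namespace_py (patterns : List String) : String :=
  if patterns = [] then "captured"
  else match aScan nsMap patterns with
       | some ns => ns
       | none => "captured"

-- ===== PORT B =====
-- _KEY_TABLE: dict comprehension over enumerate(_NAMESPACE_MAP); keys are distinct
def keyTable : PySem.Dict String (Int × String) :=
  PySem.Dict.ofList
    ((nsMap.zipIdx.map (fun e => e.1.1.map (fun k => (k, ((e.2 : Int), e.1.2))))).flatten)

-- one loop over patterns keeping the best (smallest-priority) hit
def bStep (best : Option (Int × String)) (p : String) : Option (Int × String) :=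
  match keyTable.get? p with
  | none => best
  | some hit =>
      match best with
      | none => some hit
      | some b => if hit.1 < b.1 then some hit else best

def derive_namespace_py_alt (patterns : List String) : String :=
  if patterns = [] then "captured"
  else match patterns.foldl bStep none with
       | some b => b.2
       | none => "captured"

-- ===== PRECONDITION & SPEC =====
def Spec_derive_namespace_py (patterns : List String) (out : String) : Prop := out = derive_namespace_py_alt patterns
instance (patterns : List String) (out : String) : Decidable (Spec_derive_namespace_py patterns out) := by unfold Spec_derive_namespace_py; infer_instance

-- ===== CLAIM (what is proved, stated in full; the proofs are below) =====
def Claim_equal_derive_namespace_py : Prop := ∀ (patterns : List String), Dom_derive_namespace_py patterns → Spec_derive_namespace_py patterns (derive_namespace_py patterns)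

-- ===== LEMMAS AND PROOFS =====

-- left-biased min on optional (priority, namespace) hits
def minO : Option (Int × String) → Option (Int × String) → Option (Int × String)
  | none, b => b
  | a, none => a
  | some a, some b => if b.1 < a.1 then some b else some a

theorem bStep_eq_minO (best : Option (Int × String)) (p : String) :
    bStep best p = minO best (keyTable.get? p) := by
  unfold bStep minO
  cases keyTable.get? p <;> cases best <;> simp

theorem minO_none_right (a : Option (Int × String)) : minO a none = a := by
  cases a <;> rfl

theorem minO_assoc (a b c : Option (Int × String)) :
    minO (minO a b) c = minO a (minO b c) := by
  cases a with
  | none => rfl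
  | some a => cases b with
    | none => rfl
    | some b => cases c with
      | none => simp [minO_none_right]
      | some c =>
          by_cases hba : b.1 < a.1 <;> by_cases hcb : c.1 < b.1 <;>
            by_cases hca : c.1 < a.1 <;> simp [minO, hba, hcb, hca] <;> omega

theorem foldl_bStep_shift (ps : List String) (acc : Option (Int × String)) :
    ps.foldl bStep acc = minO acc (ps.foldl bStep none) := by
  induction ps generalizing acc with
  | nil => simp [List.foldl, minO_none_right]
  | cons p ps ih =>
      simp only [List.foldl]
      rw [ih (bStep acc p), ih (bStep none p), bStep_eq_minO, bStep_eq_minO]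
      exact minO_assoc acc (keyTable.get? p) (ps.foldl bStep none)

-- the fold's value as a nested if over key membership (A's shape)
def bestSpec (ps : List String) : Option (Int × String) :=
  if ps.contains "decision" then some (0, "decisions")
  else if ps.contains "error" || ps.contains "solution" then some (1, "troubleshooting")
  else if ps.contains "pattern" || ps.contains "convention" || ps.contains "workaround" || ps.contains "configuration" then some (2, "patterns")
  else if ps.contains "important" || ps.contains "explicit" then some (3, "notes")
  else if ps.contains "definition" then some (4, "definitions")
  else none

theorem keyTable_get (p : String) :
    keyTable.get? p =
      if "decision" == p then some (0, "decisions")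
      else if "error" == p then some (1, "troubleshooting")
      else if "solution" == p then some (1, "troubleshooting")
      else if "pattern" == p then some (2, "patterns")
      else if "convention" == p then some (2, "patterns")
      else if "workaround" == p then some (2, "patterns")
      else if "configuration" == p then some (2, "patterns")
      else if "important" == p then some (3, "notes")
      else if "explicit" == p then some (3, "notes")
      else if "definition" == p then some (4, "definitions")
      else none := by
  have h : keyTable = PySem.Dict.mk
      [("decision", ((0 : Int), "decisions")), ("error", (1, "troubleshooting")),
       ("solution", (1, "troubleshooting")), ("pattern", (2, "patterns")),
       ("convention", (2, "patterns")), ("workaround", (2, "patterns")),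
       ("configuration", (2, "patterns")), ("important", (3, "notes")),
       ("explicit", (3, "notes")), ("definition", (4, "definitions"))] := by decide
  rw [h]
  simp only [PySem.Dict.get?_mk_cons]
  rfl

set_option maxHeartbeats 1000000 in
theorem foldl_bStep_eq_bestSpec (ps : List String) :
    ps.foldl bStep none = bestSpec ps := by
  induction ps with
  | nil => rfl
  | cons p ps ih =>
      have h : (p :: ps).foldl bStep none = minO (keyTable.get? p) (ps.foldl bStep none) := by
        simp only [List.foldl]
        rw [foldl_bStep_shift, bStep_eq_minO]
        rfl
      rw [h, ih, keyTable_get]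
      split_ifs with h0 h1 h2 h3 h4 h5 h6 h7 h8 h9 <;>
        simp_all [bestSpec, minO] <;>
        split_ifs <;> simp_all

theorem any_contains_eq (ps : List String) (keys : List String) :
    ps.any (fun p => keys.contains p) = keys.any (fun k => ps.contains k) := by
  rw [Bool.eq_iff_iff]
  simp only [List.any_eq_true, List.contains_eq_mem, decide_eq_true_eq]
  constructor <;> rintro ⟨x, hx, hy⟩ <;> exact ⟨_, hy, hx⟩

theorem aScan_eq_bestSpec (ps : List String) :
    aScan nsMap ps = (bestSpec ps).map (·.2) := by
  simp only [nsMap, aScan, bestSpec,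
    any_contains_eq ps ["decision"], any_contains_eq ps ["error", "solution"],
    any_contains_eq ps ["pattern", "convention", "workaround", "configuration"],
    any_contains_eq ps ["important", "explicit"], any_contains_eq ps ["definition"],
    List.any_cons, List.any_nil]
  split_ifs <;> simp_all

-- ===== VERDICT (by name: the statement is the Claim_ definition above) =====
theorem derive_namespace_py_spec : Claim_equal_derive_namespace_py := by
  intro patterns _
  unfold Spec_derive_namespace_py derive_namespace_py derive_namespace_py_alt
  rw [foldl_bStep_eq_bestSpec, aScan_eq_bestSpec]
  cases bestSpec patterns <;> simp
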